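-- pv_equiv track=rewrite | github.com/tycyd/codeforces | dfs/1187E Tree Painting.py | tree_painting
-- ===== SOURCE A (Python) =====
-- def tree_painting(n, dic):
--     memo = {}
--     res = 0
--     for i in range(1, n+1):
--         r = 0
--         for d in dic[i]:
--             r += dfs(i, d, dic, memo)[1]
--         res = max(r, res)
--
--     return res + n
--
-- def dfs(pn, cn, dic, memo):
--     if pn in memo and cn in memo[pn]:
--         return memo[pn][cn]
--     if pn not in memo:
--         memo[pn] = {}
--
--     r1 = 1
--     r2 = 0
--     for nn in dic[cn]:
--         if nn == pn:
--             continue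
--         r = dfs(cn, nn, dic, memo)
--         r1 += r[0]
--         r2 += r[1]
--     r2 += r1
--
--     memo[pn][cn] = [r1, r2]
--     return memo[pn][cn]
-- ===== SOURCE B (Python) =====
-- def tree_painting(n, dic):
--     # Per root: iterative explicit-stack DFS summing depths (depth of root = 0,
--     # each other vertex contributes its depth); answer = max over roots + n.
--     best = 0
--     for root in range(1, n + 1):
--         total = 0
--         stack = [(root, c, 1) for c in dic[root]]
--         while stack:
--             pn, cn, d = stack.pop()
--             total += d
--             for nn in dic[cn]:
--                 if nn != pn:
--                     stack.append((cn, nn, d + 1))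
--         best = max(best, total)
--     return best + n
-- ===== Notes on version B (the rewrite author's own statement) =====
-- stated objective: alternative
-- what changed: Replaces A's recursive per-directed-edge memoized DFS (computing (subtree size, sum-of-subtree-sizes) pairs in a dict-of-dicts shared across roots) by a memo-free per-root iterative explicit-stack DFS that simply accumulates vertex depths; max over roots plus n is returned, and B needs no recursion and no memo table.
-- outside the precondition, e.g. on tree_painting(1, {1: [2], 2: []}): A returns 2, B returns 2
import Mathlib
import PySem

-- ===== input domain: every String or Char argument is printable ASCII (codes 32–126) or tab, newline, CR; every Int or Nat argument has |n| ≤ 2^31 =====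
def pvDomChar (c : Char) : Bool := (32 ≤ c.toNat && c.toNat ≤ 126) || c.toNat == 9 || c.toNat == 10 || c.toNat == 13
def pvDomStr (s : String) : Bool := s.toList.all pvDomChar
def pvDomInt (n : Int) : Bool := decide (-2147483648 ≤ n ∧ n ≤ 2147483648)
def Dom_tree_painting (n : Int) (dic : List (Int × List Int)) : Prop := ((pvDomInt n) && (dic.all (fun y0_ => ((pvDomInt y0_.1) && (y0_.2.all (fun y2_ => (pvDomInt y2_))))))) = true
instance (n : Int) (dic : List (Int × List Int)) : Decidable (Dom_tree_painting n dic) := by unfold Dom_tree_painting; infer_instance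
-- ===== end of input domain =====

-- B replaces A's memoized recursive subtree-size DFS by a memo-free per-root
-- explicit-stack DFS summing vertex depths (alternative algorithm, not faster).
-- Python dict argument `dic` is the association list `dic`; first match wins.

-- shared primitive: Python `dic[k]` on the association-list dict (first match)
def pvLookup (dic : List (Int × List Int)) (k : Int) : Option (List Int) :=
  match dic with
  | [] => none
  | (a, b) :: rest => if a = k then some b else pvLookup rest k

-- shared loop shape: a Python for-loop whose body can raise (early exit = none)
def optFold {α σ : Type} (g : α → σ → Option σ) : List α → σ → Option σ
  | [], s => some s
  | x :: xs, s =>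
    match g x s with
    | none => none
    | some s' => optFold g xs s'

-- ===== PORT A =====
-- memo : dict pn -> dict cn -> [r1, r2]  (the inner [r1, r2] list ported as a pair)
abbrev PvMemo := PySem.Dict Int (PySem.Dict Int (Int × Int))

mutual
-- dfs(pn, cn, dic, memo); fuel = recursion-depth guard (Python recursion is unbounded)
def dfsA (dic : List (Int × List Int)) : Nat → Int → Int → PvMemo → Option ((Int × Int) × PvMemo)
  | 0, _, _, _ => none
  | Nat.succ f, pn, cn, memo =>
    match (match PySem.Dict.get? memo pn with
           | some inner => PySem.Dict.get? inner cn
           | none => none) with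
    | some v => some (v, memo)                  -- `if pn in memo and cn in memo[pn]`
    | none =>
      -- `if pn not in memo: memo[pn] = {}` (the updated memo feeds the loop below)
      match pvLookup dic cn with
      | none => none                            -- KeyError
      | some ns =>
        match dfsAGo dic f pn cn ns ((1, 0),
            if (PySem.Dict.get? memo pn).isSome then memo
            else PySem.Dict.insert memo pn PySem.Dict.empty) with
        | none => none
        | some ((r1, r2), m1) =>
          -- memo[pn][cn] = [r1, r2]  (r2 already includes the final `r2 += r1`)
          some ((r1, r2 + r1),
            PySem.Dict.insert m1 pn
              (PySem.Dict.insert ((PySem.Dict.get? m1 pn).getD PySem.Dict.empty) cn (r1, r2 + r1)))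
termination_by fl _ _ _ => (fl, 0)

-- `for nn in dic[cn]:` body, threading (r1, r2) and the memo
def dfsAGo (dic : List (Int × List Int)) (f : Nat) (pn cn : Int) :
    List Int → ((Int × Int) × PvMemo) → Option ((Int × Int) × PvMemo)
  | [], s => some s
  | nn :: rest, s =>
    if nn = pn then dfsAGo dic f pn cn rest s
    else
      match dfsA dic f cn nn s.2 with
      | none => none
      | some (v, m') => dfsAGo dic f pn cn rest ((s.1.1 + v.1, s.1.2 + v.2), m')
termination_by l _ => (f, l.length + 1)
end

def pvFuelA (n : Int) : Nat := n.toNat + 2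

def aStepInner (dic : List (Int × List Int)) (fa : Nat) (i d : Int) (rs : Int × PvMemo) :
    Option (Int × PvMemo) :=
  match dfsA dic fa i d rs.2 with
  | none => none
  | some (v, m') => some (rs.1 + v.2, m')       -- r += dfs(i, d, dic, memo)[1]

def aStepOuter (dic : List (Int × List Int)) (fa : Nat) (i : Int) (s : Int × PvMemo) :
    Option (Int × PvMemo) :=
  match pvLookup dic i with
  | none => none                                -- KeyError on dic[i]
  | some ns =>
    match optFold (aStepInner dic fa i) ns (0, s.2) with
    | none => none
    | some (r, m') => some (max r s.1, m')      -- res = max(r, res)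

def tree_painting (n : Int) (dic : List (Int × List Int)) : Int :=
  match optFold (aStepOuter dic (pvFuelA n)) (PySem.List.pyRange 1 (n + 1) 1)
        (0, (PySem.Dict.empty : PvMemo)) with
  | some s => s.1 + n                           -- return res + n
  | none => 0                                   -- unreachable under Pre_ (Python raises there)

-- ===== PORT B =====
-- while stack: pop (pn, cn, d); total += d; push (cn, nn, d+1) for nn != pn.
-- The Python list-stack (append/pop at the right end) is represented head-first:
-- pop = head, the pushed block appears reversed in front.  fuel = loop guard.
def stackGo (dic : List (Int × List Int)) : Nat → List (Int × Int × Int) → Int → Option Int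
  | _, [], total => some total
  | 0, _ :: _, _ => none
  | Nat.succ f, (pn, cn, d) :: rest, total =>
    match pvLookup dic cn with
    | none => none                              -- KeyError on dic[cn]
    | some ns =>
      stackGo dic f
        (((ns.filter (fun nn => nn != pn)).map (fun nn => (cn, nn, d + 1))).reverse ++ rest)
        (total + d)

def pvFuelB (n : Int) : Nat := (n.toNat + 1) ^ (n.toNat + 3) + 1

def bStep (dic : List (Int × List Int)) (fb : Nat) (root best : Int) : Option Int :=
  match pvLookup dic root with
  | none => none                                -- KeyError on dic[root]
  | some ns =>
    match stackGo dic fb ((ns.map (fun c => (root, c, 1))).reverse) 0 with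
    | none => none
    | some total => some (max best total)       -- best = max(best, total)

def tree_painting_alt (n : Int) (dic : List (Int × List Int)) : Int :=
  match optFold (bStep dic (pvFuelB n)) (PySem.List.pyRange 1 (n + 1) 1) 0 with
  | some best => best + n                       -- return best + n
  | none => 0                                   -- unreachable under Pre_

-- ===== PRECONDITION & SPEC =====
def pvAdj (dic : List (Int × List Int)) (i : Int) : List Int := (List.lookup i dic).getD []
def pvNodes (n : Int) : List Int := PySem.List.pyRange 1 (n + 1) 1
-- one peeling round: drop every vertex with at most one surviving neighbour
def pvPeelStep (dic : List (Int × List Int)) (S : List Int) : List Int :=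
  S.filter (fun v => decide (2 ≤ ((pvAdj dic v).filter (fun w => decide (w ∈ S))).length))
def pvPeel (n : Int) (dic : List (Int × List Int)) : List Int :=
  (pvPeelStep dic)^[n.toNat] (pvNodes n)

-- the whole forest check, as one short-circuiting Bool (cheap to decide):
-- all keys 1..n present, neighbours in 1..n, no loops, symmetric, duplicate-free,
-- acyclic (iterated leaf-peeling removes every vertex); the leading size guard
-- n <= len(dic) is implied for any such dict (n distinct keys) and only makes the
-- check fail fast on huge n
def pvForest (n : Int) (dic : List (Int × List Int)) : Bool :=
  decide ((n : Int) ≤ dic.length) &&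
  (pvNodes n).all (fun i => (List.lookup i dic).isSome) &&
  (pvNodes n).all (fun i => (pvAdj dic i).all
    (fun j => decide (j ∈ pvNodes n) && decide (j ≠ i) && decide (i ∈ pvAdj dic j))) &&
  (pvNodes n).all (fun i => decide ((pvAdj dic i).Nodup)) &&
  decide (pvPeel n dic = [])

-- Pre_: the problem's natural domain — `dic` is an undirected simple forest on the
-- vertices 1..n; for n ≤ 0 the loop body never runs and anything is accepted.
-- This EXCLUDES some inputs A still returns on: non-symmetric dict shapes whose
-- traversal happens to terminate (e.g. (1, {1: [2], 2: []})), where B returns the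
-- same value anyway.
def Pre_tree_painting (n : Int) (dic : List (Int × List Int)) : Prop :=
  n ≤ 0 ∨ pvForest n dic = true

instance (n : Int) (dic : List (Int × List Int)) : Decidable (Pre_tree_painting n dic) := by
  unfold Pre_tree_painting; infer_instance

def pvWitness_tree_painting : Int × (List (Int × List Int)) := (3, [(1, [2, 3]), (2, [1]), (3, [1])])

def Spec_tree_painting (n : Int) (dic : List (Int × List Int)) (out : Int) : Prop :=
  out = tree_painting_alt n dic
instance (n : Int) (dic : List (Int × List Int)) (out : Int) : Decidable (Spec_tree_painting n dic out) := by
  unfold Spec_tree_painting; infer_instance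

-- ===== CLAIM (what is proved, stated in full; the proofs are below) =====
def Claim_equal_tree_painting : Prop := ∀ (n : Int) (dic : List (Int × List Int)), Dom_tree_painting n dic → Pre_tree_painting n dic → Spec_tree_painting n dic (tree_painting n dic)

-- ===== LEMMAS AND PROOFS =====

-- pure (memo-free, state-free) model of A's dfs; both ports are related to it
mutual
def dfsP (dic : List (Int × List Int)) : Nat → Int → Int → Option (Int × Int)
  | 0, _, _ => none
  | Nat.succ f, pn, cn =>
    match pvLookup dic cn with
    | none => none
    | some ns =>
      match dfsPGo dic f pn cn ns (1, 0) with
      | none => none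
      | some (r1, r2) => some (r1, r2 + r1)
termination_by fl _ _ => (fl, 0)

def dfsPGo (dic : List (Int × List Int)) (f : Nat) (pn cn : Int) :
    List Int → (Int × Int) → Option (Int × Int)
  | [], s => some s
  | nn :: rest, s =>
    if nn = pn then dfsPGo dic f pn cn rest s
    else
      match dfsP dic f cn nn with
      | none => none
      | some v => dfsPGo dic f pn cn rest (s.1 + v.1, s.2 + v.2)
termination_by l _ => (f, l.length + 1)
end

-- `dfsP` computed the value v for (pn, cn) at some depth
def PvVal (dic : List (Int × List Int)) (pn cn : Int) (v : Int × Int) : Prop :=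
  ∃ f, dfsP dic f pn cn = some v

-- ===== basic facts about the pure model =====

theorem pvLookup_eq_lookup (dic : List (Int × List Int)) (k : Int) :
    pvLookup dic k = List.lookup k dic := by
  induction dic with
  | nil => rfl
  | cons p rest ih =>
    obtain ⟨a, b⟩ := p
    rw [pvLookup, List.lookup]
    by_cases h : a = k
    · simp [h]
    · have hk : (k == a) = false := by simp [Ne.symm h]
      rw [if_neg h, hk, ih]

theorem dfsPGo_mono_of (dic : List (Int × List Int)) (f f' : Nat) (pn cn : Int)
    (H : ∀ p c r, dfsP dic f p c = some r → dfsP dic f' p c = some r) :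
    ∀ ns s r, dfsPGo dic f pn cn ns s = some r → dfsPGo dic f' pn cn ns s = some r := by
  intro ns
  induction ns with
  | nil => intro s r h; rw [dfsPGo] at h; rw [dfsPGo]; exact h
  | cons nn rest ih =>
    intro s r h
    rw [dfsPGo] at h ⊢
    by_cases hc : nn = pn
    · simp only [if_pos hc] at h ⊢
      exact ih _ _ h
    · simp only [if_neg hc] at h ⊢
      cases hv : dfsP dic f cn nn with
      | none => rw [hv] at h; exact absurd h (by simp)
      | some v =>
        rw [hv] at h
        rw [H _ _ _ hv]
        exact ih _ _ h

theorem dfsP_mono (dic : List (Int × List Int)) :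
    ∀ f f' pn cn r, f ≤ f' → dfsP dic f pn cn = some r → dfsP dic f' pn cn = some r := by
  intro f
  induction f with
  | zero => intro f' pn cn r _ h; rw [dfsP] at h; exact absurd h (by simp)
  | succ f ih =>
    intro f' pn cn r hle h
    obtain ⟨f'', rfl⟩ : ∃ k, f' = k + 1 := ⟨f' - 1, by omega⟩
    rw [dfsP] at h ⊢
    cases hl : pvLookup dic cn with
    | none => simp only [hl] at h; exact absurd h (by simp)
    | some ns =>
      simp only [hl] at h ⊢
      have hmono := dfsPGo_mono_of dic f f'' pn cn (fun p c r hr => ih f'' p c r (by omega) hr)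
      cases hg : dfsPGo dic f pn cn ns (1, 0) with
      | none => simp only [hg] at h; exact absurd h (by simp)
      | some pr => simp only [hg] at h; simp only [hmono _ _ _ hg]; exact h

theorem pvVal_unique (dic : List (Int × List Int)) (pn cn : Int) (v w : Int × Int)
    (hv : PvVal dic pn cn v) (hw : PvVal dic pn cn w) : v = w := by
  obtain ⟨f, hf⟩ := hv
  obtain ⟨g, hg⟩ := hw
  have h1 := dfsP_mono dic f (max f g) pn cn v (le_max_left _ _) hf
  have h2 := dfsP_mono dic g (max f g) pn cn w (le_max_right _ _) hg
  rw [h1] at h2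
  exact Option.some.inj h2

-- inversion: what a successful dfsPGo run says about the children
theorem dfsPGo_inv (dic : List (Int × List Int)) (f : Nat) (pn cn : Int) :
    ∀ ns r1 r2 a b, dfsPGo dic f pn cn ns (r1, r2) = some (a, b) →
      ∃ vs, List.Forall₂ (fun nn v => dfsP dic f cn nn = some v) (ns.filter (fun nn => nn != pn)) vs ∧
        a = r1 + (vs.map Prod.fst).sum ∧ b = r2 + (vs.map Prod.snd).sum := by
  intro ns
  induction ns with
  | nil =>
    intro r1 r2 a b h
    rw [dfsPGo] at h
    obtain ⟨ha, hb⟩ : r1 = a ∧ r2 = b := by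
      constructor <;> [exact congrArg Prod.fst (Option.some.inj h); exact congrArg Prod.snd (Option.some.inj h)]
    exact ⟨[], by simp, by simp [ha], by simp [hb]⟩
  | cons nn rest ih =>
    intro r1 r2 a b h
    rw [dfsPGo] at h
    by_cases hc : nn = pn
    · simp only [if_pos hc] at h
      obtain ⟨vs, h2, h3, h4⟩ := ih r1 r2 a b h
      refine ⟨vs, ?_, h3, h4⟩
      simpa [hc] using h2
    · simp only [if_neg hc] at h
      cases hv : dfsP dic f cn nn with
      | none => rw [hv] at h; exact absurd h (by simp)
      | some v =>
        rw [hv] at h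
        obtain ⟨vs, h2, h3, h4⟩ := ih _ _ a b h
        refine ⟨v :: vs, ?_, by simp [h3]; ring, by simp [h4]; ring⟩
        have : (nn :: rest).filter (fun nn => nn != pn) = nn :: rest.filter (fun nn => nn != pn) := by
          simp [hc]
        rw [this]
        exact List.Forall₂.cons hv h2

theorem dfsP_inv (dic : List (Int × List Int)) (f : Nat) (pn cn : Int) (a b : Int)
    (h : dfsP dic (f + 1) pn cn = some (a, b)) :
    ∃ ns vs, pvLookup dic cn = some ns ∧
      List.Forall₂ (fun nn v => dfsP dic f cn nn = some v) (ns.filter (fun nn => nn != pn)) vs ∧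
      a = 1 + (vs.map Prod.fst).sum ∧ b = (vs.map Prod.snd).sum + a := by
  rw [dfsP] at h
  cases hl : pvLookup dic cn with
  | none => simp only [hl] at h; exact absurd h (by simp)
  | some ns =>
    simp only [hl] at h
    cases hg : dfsPGo dic f pn cn ns (1, 0) with
    | none => simp only [hg] at h; exact absurd h (by simp)
    | some pr =>
      simp only [hg] at h
      obtain ⟨r1, r2⟩ := pr
      obtain ⟨vs, h2, h3, h4⟩ := dfsPGo_inv dic f pn cn ns 1 0 r1 r2 hg
      have ha : r1 = a := congrArg Prod.fst (Option.some.inj h)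
      have hb : r2 + r1 = b := congrArg Prod.snd (Option.some.inj h)
      exact ⟨ns, vs, rfl, h2, by omega, by omega⟩

-- construction: dfsPGo succeeds as soon as every (non-parent) child call succeeds
theorem dfsPGo_some (dic : List (Int × List Int)) (f : Nat) (pn cn : Int) :
    ∀ ns s, (∀ nn ∈ ns, nn ≠ pn → ∃ v, dfsP dic f cn nn = some v) →
      ∃ r, dfsPGo dic f pn cn ns s = some r := by
  intro ns
  induction ns with
  | nil => intro s _; exact ⟨s, by rw [dfsPGo]⟩
  | cons nn rest ih =>
    intro s hall
    rw [dfsPGo]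
    by_cases hc : nn = pn
    · simp only [if_pos hc]
      exact ih s (fun x hx hne => hall x (by simp [hx]) hne)
    · simp only [if_neg hc]
      obtain ⟨v, hv⟩ := hall nn (by simp) hc
      rw [hv]
      exact ih _ (fun x hx hne => hall x (by simp [hx]) hne)

theorem pv_forall₂_right {α β : Type} {R : α → β → Prop} :
    ∀ {l1 : List α} {l2 : List β}, List.Forall₂ R l1 l2 → ∀ v ∈ l2, ∃ x ∈ l1, R x v := by
  intro l1 l2 h
  induction h with
  | nil => intro v hv; simp at hv
  | cons h1 h2 ih =>
    intro v hv
    rcases List.mem_cons.1 hv with rfl | hv'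
    · exact ⟨_, by simp, h1⟩
    · obtain ⟨x, hx, hR⟩ := ih v hv'
      exact ⟨x, by simp [hx], hR⟩

theorem dfsP_fst_pos (dic : List (Int × List Int)) :
    ∀ f pn cn a b, dfsP dic f pn cn = some (a, b) → 1 ≤ a := by
  intro f
  induction f with
  | zero => intro pn cn a b h; rw [dfsP] at h; exact absurd h (by simp)
  | succ f ih =>
    intro pn cn a b h
    obtain ⟨ns, vs, _, h2, h3, _⟩ := dfsP_inv dic f pn cn a b h
    have hnn : ∀ v ∈ vs, (0:Int) ≤ v.1 := by
      intro v hv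
      obtain ⟨x, _, hR⟩ := pv_forall₂_right h2 v hv
      have := ih _ _ _ _ hR
      omega
    have : (0:Int) ≤ (vs.map Prod.fst).sum :=
      List.sum_nonneg (by intro x hx; obtain ⟨v, hv, rfl⟩ := List.mem_map.1 hx; exact hnn v hv)
    omega

theorem forall₂_fst_pos (dic : List (Int × List Int)) (f : Nat) (cn : Int) {cs : List Int}
    {vs : List (Int × Int)} (h : List.Forall₂ (fun nn v => dfsP dic f cn nn = some v) cs vs) :
    ∀ v ∈ vs, 1 ≤ v.1 := by
  intro v hv
  obtain ⟨x, _, hR⟩ := pv_forall₂_right h v hv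
  exact dfsP_fst_pos dic f _ _ _ _ hR

-- ===== the cycle / peeling argument =====

-- every vertex of C keeps two distinct neighbours inside C: C never gets peeled
def PvThick (dic : List (Int × List Int)) (C : List Int) : Prop :=
  ∀ x ∈ C, ∃ u w, u ∈ pvAdj dic x ∧ w ∈ pvAdj dic x ∧ u ∈ C ∧ w ∈ C ∧ u ≠ w

theorem two_mem_length {α : Type} {l : List α} {u w : α}
    (hu : u ∈ l) (hw : w ∈ l) (hne : u ≠ w) : 2 ≤ l.length := by
  cases l with
  | nil => simp at hu
  | cons x t =>
    cases t with
    | nil =>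
      simp at hu hw
      exact absurd (hu.trans hw.symm) hne
    | cons y t2 => simp

theorem thick_mem_iter (dic : List (Int × List Int)) (C S0 : List Int)
    (hC : PvThick dic C) (hsub : ∀ x ∈ C, x ∈ S0) :
    ∀ t, ∀ x ∈ C, x ∈ (pvPeelStep dic)^[t] S0 := by
  intro t
  induction t with
  | zero => simpa using hsub
  | succ t ih =>
    intro x hx
    rw [Function.iterate_succ_apply']
    unfold pvPeelStep
    rw [List.mem_filter]
    refine ⟨ih x hx, ?_⟩
    obtain ⟨u, w, hu, hw, huC, hwC, hne⟩ := hC x hx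
    have hu' : u ∈ (pvAdj dic x).filter (fun y => decide (y ∈ (pvPeelStep dic)^[t] S0)) :=
      List.mem_filter.2 ⟨hu, by simpa using ih u huC⟩
    have hw' : w ∈ (pvAdj dic x).filter (fun y => decide (y ∈ (pvPeelStep dic)^[t] S0)) :=
      List.mem_filter.2 ⟨hw, by simpa using ih w hwC⟩
    simpa using two_mem_length hu' hw' hne

-- a closed simple cycle is thick
theorem cycle_thick (dic : List (Int × List Int)) (C : List Int)
    (hlen : 3 ≤ C.length) (hnd : C.Nodup)
    (hadj : ∀ i : Nat, (h : i + 1 < C.length) → C[i + 1] ∈ pvAdj dic (C[i]'(by omega)))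
    (hwrap : (C[C.length - 1]'(by omega)) ∈ pvAdj dic (C[0]'(by omega)))
    (hsym : ∀ a ∈ C, ∀ b ∈ pvAdj dic a, a ∈ pvAdj dic b) :
    PvThick dic C := by
  intro x hx
  obtain ⟨i, hi, rfl⟩ := List.mem_iff_getElem.1 hx
  by_cases hnext : i + 1 < C.length
  · by_cases hprev : 0 < i
    · -- middle: neighbours C[i+1] and C[i-1]
      refine ⟨C[i + 1], C[i - 1]'(by omega), hadj i hnext, ?_, List.getElem_mem _, List.getElem_mem _, ?_⟩
      · have h1 : (C[i - 1 + 1]'(by omega)) ∈ pvAdj dic (C[i - 1]'(by omega)) := hadj (i - 1) (by omega)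
        have h2 : C[i - 1 + 1] = C[i]'hi := by congr 1; omega
        rw [h2] at h1
        exact hsym _ (List.getElem_mem _) _ h1
      · intro heq
        have := (hnd.getElem_inj_iff).1 heq
        omega
    · -- i = 0: neighbours C[1] and C[C.length - 1]
      have hi0 : i = 0 := by omega
      subst hi0
      refine ⟨C[0 + 1], C[C.length - 1]'(by omega), hadj 0 hnext, hwrap, List.getElem_mem _, List.getElem_mem _, ?_⟩
      intro heq
      have := (hnd.getElem_inj_iff).1 heq
      omega
  · -- i = C.length - 1: neighbours C[0] and C[i-1]
    have hil : i = C.length - 1 := by omega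
    refine ⟨C[0]'(by omega), C[i - 1]'(by omega), ?_, ?_, List.getElem_mem _, List.getElem_mem _, ?_⟩
    · have : (C[C.length - 1]'(by omega)) ∈ pvAdj dic (C[0]'(by omega)) := hwrap
      have h2 : (C[C.length - 1]'(by omega)) = C[i]'hi := by congr 1; omega
      rw [h2] at this
      exact hsym _ (List.getElem_mem _) _ this
    · have h1 : (C[i - 1 + 1]'(by omega)) ∈ pvAdj dic (C[i - 1]'(by omega)) := hadj (i - 1) (by omega)
      have h2 : C[i - 1 + 1] = C[i]'hi := by congr 1; omega
      rw [h2] at h1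
      exact hsym _ (List.getElem_mem _) _ h1
    · intro heq
      have := (hnd.getElem_inj_iff).1 heq
      omega

-- ===== termination of the pure dfs on Pre_ inputs =====

theorem nodup_nodes_length_le (n : Int) (l : List Int) (hnd : l.Nodup)
    (hsub : ∀ x ∈ l, x ∈ pvNodes n) : l.length ≤ n.toNat := by
  have hsp : List.Subperm l (pvNodes n) := hnd.subperm (fun x hx => hsub x hx)
  have hle := hsp.length_le
  have : (pvNodes n).length = n.toNat := by
    simp [pvNodes, PySem.List.length_pyRange_one]
  omega

theorem pvForest_spec (n : Int) (dic : List (Int × List Int)) (h : pvForest n dic = true) :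
    (∀ i ∈ pvNodes n, (List.lookup i dic).isSome = true) ∧
    (∀ i ∈ pvNodes n, ∀ j ∈ pvAdj dic i, j ∈ pvNodes n ∧ j ≠ i ∧ i ∈ pvAdj dic j) ∧
    (∀ i ∈ pvNodes n, (pvAdj dic i).Nodup) ∧
    pvPeel n dic = [] := by
  rw [pvForest] at h
  simp only [Bool.and_eq_true, List.all_eq_true, decide_eq_true_eq] at h
  obtain ⟨⟨⟨⟨_, h1⟩, h2⟩, h3⟩, h5⟩ := h
  exact ⟨h1, fun i hi j hj => ⟨(h2 i hi j hj).1.1, (h2 i hi j hj).1.2, (h2 i hi j hj).2⟩, h3, h5⟩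

theorem pvT (n : Int) (dic : List (Int × List Int))
    (H1 : ∀ i ∈ pvNodes n, (List.lookup i dic).isSome = true)
    (H2 : ∀ i ∈ pvNodes n, ∀ j ∈ pvAdj dic i, j ∈ pvNodes n ∧ j ≠ i ∧ i ∈ pvAdj dic j)
    (H5 : pvPeel n dic = []) :
    ∀ f (rest : List Int) pn cn,
      List.IsChain (fun a b => b ∈ pvAdj dic a) (cn :: pn :: rest) →
      (cn :: pn :: rest).Nodup →
      (∀ x ∈ cn :: pn :: rest, x ∈ pvNodes n) →
      n.toNat + 1 ≤ f + (cn :: pn :: rest).length →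
      ∃ r, dfsP dic f pn cn = some r := by
  intro f
  induction f with
  | zero =>
    intro rest pn cn hchain hnd hsubn hfuel
    exfalso
    have := nodup_nodes_length_le n _ hnd hsubn
    omega
  | succ f ih =>
    intro rest pn cn hchain hnd hsubn hfuel
    have hcn : cn ∈ pvNodes n := hsubn cn (by simp)
    obtain ⟨ns, hns⟩ : ∃ ns, pvLookup dic cn = some ns := by
      have h1 := H1 cn hcn
      rw [← pvLookup_eq_lookup] at h1
      cases h : pvLookup dic cn with
      | none => rw [h] at h1; simp at h1
      | some l => exact ⟨l, rfl⟩
    have hadjeq : pvAdj dic cn = ns := by simp [pvAdj, ← pvLookup_eq_lookup, hns]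
    have hchild : ∀ nn ∈ ns, nn ≠ pn → ∃ v, dfsP dic f cn nn = some v := by
      intro nn hnnmem hnnne
      have hnnadj : nn ∈ pvAdj dic cn := by rw [hadjeq]; exact hnnmem
      have hnn := H2 cn hcn nn hnnadj
      by_cases hmem : nn ∈ cn :: pn :: rest
      · exfalso
        -- nn closes a simple cycle; peeling can then never empty the vertex list
        obtain ⟨j, hj, hjv⟩ := List.mem_iff_getElem.1 hmem
        have hj2 : 2 ≤ j := by
          rcases Nat.lt_or_ge j 2 with h | h
          · interval_cases j
            · simp at hjv; exact absurd hjv.symm hnn.2.1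
            · simp at hjv; exact absurd hjv.symm hnnne
          · exact h
        set R := cn :: pn :: rest with hR
        set C := R.take (j + 1) with hCdef
        have hClen : C.length = j + 1 := by
          simp [hCdef]; omega
        have hCget : ∀ k : Nat, (h : k < C.length) → C[k] = R[k]'(by simp [hCdef] at h ⊢; omega) := by
          intro k h
          simp [hCdef]
        have hthick : PvThick dic C := by
          apply cycle_thick dic C (by omega) (List.Sublist.nodup (List.take_sublist _ _) hnd)
          · intro k hk
            rw [hCget (k+1) hk, hCget k (by omega)]
            exact hchain.getElem k (by simp [hCdef] at hk ⊢; omega)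
          · rw [hCget (C.length - 1) (by omega), hCget 0 (by omega)]
            have e1 : C.length - 1 = j := by omega
            simp only [e1]
            have e2 : R[j]'(by omega) = nn := hjv
            rw [e2]
            simpa [hR] using hnnadj
          · intro a ha b hb
            have haR : a ∈ R := List.mem_of_mem_take ha
            exact (H2 a (hsubn a haR) b hb).2.2
        have hmemC : cn ∈ C := by
          have : C[0]'(by omega) = cn := by rw [hCget 0 (by omega)]; simp [hR]
          rw [← this]
          exact List.getElem_mem _
        have := thick_mem_iter dic C (pvNodes n) hthick
          (fun x hx => hsubn x (List.mem_of_mem_take hx)) n.toNat cn hmemC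
        rw [pvPeel] at H5
        rw [H5] at this
        simp at this
      · refine ih (pn :: rest) cn nn ?_ ?_ ?_ ?_
        · exact List.isChain_cons_cons.2 ⟨hnn.2.2, hchain⟩
        · exact List.Nodup.cons hmem hnd
        · intro x hx
          rcases List.mem_cons.1 hx with rfl | hx'
          · exact hnn.1
          · exact hsubn x hx'
        · simp at hfuel ⊢
          omega
    obtain ⟨r0, hr0⟩ := dfsPGo_some dic f pn cn ns (1, 0) hchild
    obtain ⟨a, b⟩ := r0
    refine ⟨(a, b + a), ?_⟩
    rw [dfsP]
    simp only [hns, hr0]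

-- ===== the size bound (fuel for B's stack loop) =====

theorem dfsP_fst_le (n : Int) (dic : List (Int × List Int))
    (H2 : ∀ i ∈ pvNodes n, ∀ j ∈ pvAdj dic i, j ∈ pvNodes n ∧ j ≠ i ∧ i ∈ pvAdj dic j)
    (H3 : ∀ i ∈ pvNodes n, (pvAdj dic i).Nodup) :
    ∀ f pn cn a b, cn ∈ pvNodes n → dfsP dic f pn cn = some (a, b) →
      a ≤ ((n.toNat : Int) + 1) ^ f := by
  intro f
  induction f with
  | zero => intro pn cn a b _ h; rw [dfsP] at h; exact absurd h (by simp)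
  | succ f ih =>
    intro pn cn a b hcn h
    obtain ⟨ns, vs, hns, h2, h3, _⟩ := dfsP_inv dic f pn cn a b h
    have hadjeq : pvAdj dic cn = ns := by simp [pvAdj, ← pvLookup_eq_lookup, hns]
    have hnsnodes : ∀ x ∈ ns, x ∈ pvNodes n := by
      intro x hx
      exact (H2 cn hcn x (by rw [hadjeq]; exact hx)).1
    have hlen_ns : ns.length ≤ n.toNat := by
      apply nodup_nodes_length_le n ns _ hnsnodes
      rw [← hadjeq]; exact H3 cn hcn
    have hlen_vs : vs.length ≤ ns.length := by
      have := h2.length_eq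
      have := List.length_filter_le (fun nn => nn != pn) ns
      omega
    have heach : ∀ x ∈ vs.map Prod.fst, x ≤ ((n.toNat : Int) + 1) ^ f := by
      intro x hx
      obtain ⟨v, hv, rfl⟩ := List.mem_map.1 hx
      obtain ⟨c, hc, hR⟩ := pv_forall₂_right h2 v hv
      have hcns : c ∈ ns := List.mem_of_mem_filter hc
      obtain ⟨a', b'⟩ := v
      exact ih cn c a' b' (hnsnodes c hcns) hR
    have hsum : (vs.map Prod.fst).sum ≤ (vs.length : Int) * ((n.toNat : Int) + 1) ^ f := by
      have := List.sum_le_card_nsmul (vs.map Prod.fst) (((n.toNat : Int) + 1) ^ f) heach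
      simpa [nsmul_eq_mul] using this
    have hB : (1 : Int) ≤ ((n.toNat : Int) + 1) ^ f := one_le_pow₀ (by omega)
    have hfin : ((vs.length : Int)) ≤ (n.toNat : Int) := by exact_mod_cast le_trans (Nat.cast_le.2 hlen_vs) (Nat.cast_le.2 hlen_ns)
    have hmul : (vs.length : Int) * ((n.toNat : Int) + 1) ^ f ≤ (n.toNat : Int) * ((n.toNat : Int) + 1) ^ f :=
      mul_le_mul_of_nonneg_right hfin (by positivity)
    rw [pow_succ]
    nlinarith [hB, hsum, hmul]

-- ===== B's stack loop computes a linear combination of dfsP values =====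

def pvPhi : List (Int × Int × Int) → List (Int × Int) → Int
  | it :: st, v :: vs => (it.2.2 - 1) * v.1 + v.2 + pvPhi st vs
  | _, _ => 0

theorem pvPhi_append (sa : List (Int × Int × Int)) (va : List (Int × Int))
    (hlen : sa.length = va.length) (sb : List (Int × Int × Int)) (vb : List (Int × Int)) :
    pvPhi (sa ++ sb) (va ++ vb) = pvPhi sa va + pvPhi sb vb := by
  induction sa generalizing va with
  | nil =>
    cases va with
    | nil => simp [pvPhi]
    | cons v va' => simp at hlen
  | cons it sa' ih =>
    cases va with
    | nil => simp at hlen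
    | cons v va' =>
      simp only [List.cons_append, pvPhi]
      rw [ih va' (by simpa using hlen)]
      ring

theorem pvPhi_reverse (sa : List (Int × Int × Int)) (va : List (Int × Int))
    (hlen : sa.length = va.length) : pvPhi sa.reverse va.reverse = pvPhi sa va := by
  induction sa generalizing va with
  | nil =>
    cases va with
    | nil => simp
    | cons v va' => simp at hlen
  | cons it sa' ih =>
    cases va with
    | nil => simp at hlen
    | cons v va' =>
      have hlen' : sa'.length = va'.length := by simpa using hlen
      simp only [List.reverse_cons]
      rw [pvPhi_append sa'.reverse va'.reverse (by simp [hlen']) [it] [v]]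
      rw [ih va' hlen']
      simp [pvPhi]
      ring

theorem pvPhi_map (cn d : Int) (cs : List Int) (ws : List (Int × Int))
    (hlen : cs.length = ws.length) :
    pvPhi (cs.map (fun nn => (cn, nn, d + 1))) ws
      = d * (ws.map Prod.fst).sum + (ws.map Prod.snd).sum := by
  induction cs generalizing ws with
  | nil =>
    cases ws with
    | nil => simp [pvPhi]
    | cons w ws' => simp at hlen
  | cons c cs' ih =>
    cases ws with
    | nil => simp at hlen
    | cons w ws' =>
      simp only [pvPhi, List.map, List.sum_cons]
      rw [ih ws' (by simpa using hlen)]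
      ring

theorem stack_run (dic : List (Int × List Int)) :
    ∀ (f : Nat) (st : List (Int × Int × Int)) vs total,
      List.Forall₂ (fun (it : Int × Int × Int) v => PvVal dic it.1 it.2.1 v) st vs →
      (vs.map Prod.fst).sum ≤ (f : Int) →
      stackGo dic f st total = some (total + pvPhi st vs) := by
  have hposval : ∀ (st : List (Int × Int × Int)) (vs : List (Int × Int)),
      List.Forall₂ (fun (it : Int × Int × Int) v => PvVal dic it.1 it.2.1 v) st vs →
      ∀ v ∈ vs, (1 : Int) ≤ v.1 := by
    intro st vs h v hv
    obtain ⟨it, _, hval⟩ := pv_forall₂_right h v hv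
    obtain ⟨g, hg⟩ := hval
    obtain ⟨a, b⟩ := v
    exact dfsP_fst_pos dic g _ _ _ _ hg
  intro f
  induction f with
  | zero =>
    intro st vs total hf2 hfuel
    cases hf2 with
    | nil => rw [stackGo]; simp [pvPhi]
    | @cons it v st' vs' h1 h2 =>
      exfalso
      have hv1 : (1 : Int) ≤ v.1 := hposval _ _ (List.Forall₂.cons h1 h2) v (by simp)
      have hrest : (0 : Int) ≤ (vs'.map Prod.fst).sum :=
        List.sum_nonneg (by
          intro x hx
          obtain ⟨w, hw, rfl⟩ := List.mem_map.1 hx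
          have := hposval _ _ h2 w hw
          omega)
      simp only [List.map_cons, List.sum_cons] at hfuel
      omega
  | succ f ih =>
    intro st vs total hf2 hfuel
    cases hf2 with
    | nil => rw [stackGo]; simp [pvPhi]
    | @cons it v st' vs' h1 h2 =>
      obtain ⟨pn, cn, d⟩ := it
      obtain ⟨a, b⟩ := v
      have h1' : ∃ g, dfsP dic g pn cn = some (a, b) := h1
      obtain ⟨g, hg⟩ := h1'
      obtain ⟨g', rfl⟩ : ∃ k, g = k + 1 := by
        cases g with
        | zero => rw [dfsP] at hg; exact absurd hg (by simp)
        | succ k => exact ⟨k, rfl⟩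
      obtain ⟨ns, ws, hns, hws, ha, hb⟩ := dfsP_inv dic g' pn cn a b hg
      rw [stackGo]
      simp only [hns]
      have hlenws := hws.length_eq
      have hf2' : List.Forall₂ (fun (it : Int × Int × Int) v => PvVal dic it.1 it.2.1 v)
          ((((ns.filter (fun nn => nn != pn)).map (fun nn => (cn, nn, d + 1))).reverse ++ st'))
          (ws.reverse ++ vs') := by
        refine List.rel_append ?_ h2
        rw [List.forall₂_reverse_iff]
        rw [List.forall₂_map_left_iff]
        exact hws.imp (fun _ _ hx => ⟨g', hx⟩)
      have hwpos : ∀ w ∈ ws, (1 : Int) ≤ w.1 := forall₂_fst_pos dic g' cn hws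
      have hfuel' : ((ws.reverse ++ vs').map Prod.fst).sum ≤ ((f : Nat) : Int) := by
        simp only [List.map_append, List.map_reverse, List.sum_append, List.sum_reverse]
        simp only [List.map_cons, List.sum_cons] at hfuel
        push_cast at hfuel ⊢
        omega
      rw [ih _ _ (total + d) hf2' hfuel']
      congr 1
      have hphi : pvPhi (((ns.filter (fun nn => nn != pn)).map (fun nn => (cn, nn, d + 1))).reverse ++ st')
          (ws.reverse ++ vs')
          = d * (ws.map Prod.fst).sum + (ws.map Prod.snd).sum + pvPhi st' vs' := by
        rw [pvPhi_append _ _ (by simp [hlenws]) _ _]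
        rw [pvPhi_reverse _ _ (by simp [hlenws])]
        rw [pvPhi_map cn d _ _ (by simp [hlenws])]
      rw [hphi]
      simp only [pvPhi]
      subst hb
      subst ha
      ring

-- ===== A's memoized dfs simulates the pure dfs =====

def PvCoherent (dic : List (Int × List Int)) (m : PvMemo) : Prop :=
  ∀ p inner, PySem.Dict.get? m p = some inner →
    ∀ c v, PySem.Dict.get? inner c = some v → PvVal dic p c v

theorem coherent_empty (dic : List (Int × List Int)) : PvCoherent dic PySem.Dict.empty := by
  intro p inner h
  rw [PySem.Dict.get?_empty] at h
  exact absurd h (by simp)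

theorem coherent_insert_entry (dic : List (Int × List Int)) (m : PvMemo) (pn cn : Int)
    (v : Int × Int) (hm : PvCoherent dic m) (hv : PvVal dic pn cn v) :
    PvCoherent dic (PySem.Dict.insert m pn
      (PySem.Dict.insert ((PySem.Dict.get? m pn).getD PySem.Dict.empty) cn v)) := by
  intro p inner h c v' hv'
  rw [PySem.Dict.get?_insert] at h
  by_cases hp : p = pn
  · subst hp
    rw [if_pos rfl] at h
    obtain rfl := Option.some.inj h
    rw [PySem.Dict.get?_insert] at hv'
    by_cases hc : c = cn
    · subst hc
      rw [if_pos rfl] at hv'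
      obtain rfl := Option.some.inj hv'
      exact hv
    · rw [if_neg hc] at hv'
      cases hmp : PySem.Dict.get? m p with
      | none => rw [hmp, Option.getD_none, PySem.Dict.get?_empty] at hv'; exact absurd hv' (by simp)
      | some inner0 =>
        rw [hmp] at hv'
        exact hm p inner0 hmp c v' hv'
  · rw [if_neg hp] at h
    exact hm p inner h c v' hv'

theorem dfsAGo_sim (dic : List (Int × List Int)) (f : Nat) (pn cn : Int)
    (H : ∀ p c m v, dfsP dic f p c = some v → PvCoherent dic m →
      ∃ m', dfsA dic f p c m = some (v, m') ∧ PvCoherent dic m') :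
    ∀ ns s m r, dfsPGo dic f pn cn ns s = some r → PvCoherent dic m →
      ∃ m', dfsAGo dic f pn cn ns (s, m) = some (r, m') ∧ PvCoherent dic m' := by
  intro ns
  induction ns with
  | nil =>
    intro s m r h hm
    rw [dfsPGo] at h
    obtain rfl := Option.some.inj h
    exact ⟨m, by rw [dfsAGo], hm⟩
  | cons nn rest ih =>
    intro s m r h hm
    rw [dfsPGo] at h
    rw [dfsAGo]
    by_cases hc : nn = pn
    · simp only [if_pos hc] at h ⊢
      exact ih s m r h hm
    · simp only [if_neg hc] at h ⊢
      cases hv : dfsP dic f cn nn with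
      | none => rw [hv] at h; exact absurd h (by simp)
      | some v =>
        rw [hv] at h
        obtain ⟨m1, hA, hm1⟩ := H cn nn m v hv hm
        simp only [hA]
        exact ih _ m1 r h hm1

theorem dfsA_sim (dic : List (Int × List Int)) :
    ∀ f pn cn m v, dfsP dic f pn cn = some v → PvCoherent dic m →
      ∃ m', dfsA dic f pn cn m = some (v, m') ∧ PvCoherent dic m' := by
  intro f
  induction f with
  | zero => intro pn cn m v h _; rw [dfsP] at h; exact absurd h (by simp)
  | succ f ih =>
    intro pn cn m v hP hm
    have key : ∀ m0 : PvMemo, PvCoherent dic m0 →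
        ∃ m', (match pvLookup dic cn with
               | none => none
               | some ns =>
                 match dfsAGo dic f pn cn ns ((1, 0), m0) with
                 | none => none
                 | some ((r1, r2), m1) =>
                   some ((r1, r2 + r1),
                     PySem.Dict.insert m1 pn
                       (PySem.Dict.insert ((PySem.Dict.get? m1 pn).getD PySem.Dict.empty) cn (r1, r2 + r1)))) = some (v, m') ∧ PvCoherent dic m' := by
      intro m0 hm0
      rw [dfsP] at hP
      cases hl : pvLookup dic cn with
      | none => rw [hl] at hP; exact absurd hP (by simp)
      | some ns =>
        simp only [hl] at hP ⊢
        cases hg : dfsPGo dic f pn cn ns (1, 0) with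
        | none => rw [hg] at hP; exact absurd hP (by simp)
        | some pr =>
          obtain ⟨r1, r2⟩ := pr
          simp only [hg] at hP
          obtain rfl := Option.some.inj hP
          obtain ⟨m1, hA, hm1⟩ := dfsAGo_sim dic f pn cn (fun p c m v hv hcm => ih p c m v hv hcm) ns (1, 0) m0 (r1, r2) hg hm0
          simp only [hA]
          refine ⟨_, rfl, ?_⟩
          exact coherent_insert_entry dic m1 pn cn (r1, r2 + r1) hm1 ⟨f + 1, by rw [dfsP]; simp only [hl, hg]⟩
    rw [dfsA]
    cases hmp : PySem.Dict.get? m pn with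
    | some inner =>
      cases hmc : PySem.Dict.get? inner cn with
      | some v' =>
        have hval : PvVal dic pn cn v' := hm pn inner hmp cn v' hmc
        obtain rfl : v' = v := pvVal_unique dic pn cn v' v hval ⟨f + 1, hP⟩
        simp only [hmc]
        exact ⟨m, rfl, hm⟩
      | none =>
        simp only [hmc, Option.isSome_some, if_pos]
        exact key m hm
    | none =>
      simp only [Option.isSome_none, Bool.false_eq_true, if_false]
      refine key (PySem.Dict.insert m pn PySem.Dict.empty) ?_
      intro p inner h c v' hv'
      rw [PySem.Dict.get?_insert] at h
      by_cases hp : p = pn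
      · subst hp
        rw [if_pos rfl] at h
        obtain rfl := Option.some.inj h
        rw [PySem.Dict.get?_empty] at hv'
        exact absurd hv' (by simp)
      · rw [if_neg hp] at h
        exact hm p inner h c v' hv'

-- ===== assembly =====

theorem exists_forall₂ (dic : List (Int × List Int)) (f : Nat) (cn : Int) :
    ∀ ns : List Int, (∀ d ∈ ns, ∃ v, dfsP dic f cn d = some v) →
      ∃ vs, List.Forall₂ (fun d v => dfsP dic f cn d = some v) ns vs := by
  intro ns
  induction ns with
  | nil => intro _; exact ⟨[], List.Forall₂.nil⟩
  | cons d rest ih =>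
    intro hall
    obtain ⟨v, hv⟩ := hall d (by simp)
    obtain ⟨vs, hvs⟩ := ih (fun x hx => hall x (by simp [hx]))
    exact ⟨v :: vs, List.Forall₂.cons hv hvs⟩

theorem aInner_run (dic : List (Int × List Int)) (fa : Nat) (i : Int) :
    ∀ (ns : List Int) (vs : List (Int × Int)) (r0 : Int) (m : PvMemo),
      List.Forall₂ (fun d v => dfsP dic fa i d = some v) ns vs → PvCoherent dic m →
      ∃ m', optFold (aStepInner dic fa i) ns (r0, m)
              = some (r0 + (vs.map Prod.snd).sum, m') ∧ PvCoherent dic m' := by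
  intro ns vs r0 m hf2 hm
  induction hf2 generalizing r0 m with
  | nil => exact ⟨m, by rw [optFold]; simp, hm⟩
  | @cons d v rest vrest h1 h2 ih =>
    obtain ⟨m1, hA, hm1⟩ := dfsA_sim dic fa i d m v h1 hm
    obtain ⟨m', hrec, hm'⟩ := ih (r0 + v.2) m1 hm1
    refine ⟨m', ?_, hm'⟩
    rw [optFold]
    simp only [aStepInner, hA]
    rw [hrec]
    congr 2
    simp [List.sum_cons]
    ring

theorem loops_eq (n : Int) (dic : List (Int × List Int))
    (H1 : ∀ i ∈ pvNodes n, (List.lookup i dic).isSome = true)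
    (H2 : ∀ i ∈ pvNodes n, ∀ j ∈ pvAdj dic i, j ∈ pvNodes n ∧ j ≠ i ∧ i ∈ pvAdj dic j)
    (H3 : ∀ i ∈ pvNodes n, (pvAdj dic i).Nodup)
    (H5 : pvPeel n dic = []) :
    ∀ L : List Int, (∀ i ∈ L, i ∈ pvNodes n) → ∀ (res : Int) (m : PvMemo), PvCoherent dic m →
      ∃ best m', optFold (aStepOuter dic (pvFuelA n)) L (res, m) = some (best, m') ∧
        optFold (bStep dic (pvFuelB n)) L res = some best := by
  intro L
  induction L with
  | nil =>
    intro _ res m hm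
    exact ⟨res, m, by rw [optFold], by rw [optFold]⟩
  | cons i L' ih =>
    intro hsub res m hm
    have hi : i ∈ pvNodes n := hsub i (by simp)
    obtain ⟨ns, hns⟩ : ∃ ns, pvLookup dic i = some ns := by
      have h1 := H1 i hi
      rw [← pvLookup_eq_lookup] at h1
      cases h : pvLookup dic i with
      | none => rw [h] at h1; simp at h1
      | some l => exact ⟨l, rfl⟩
    have hadjeq : pvAdj dic i = ns := by simp [pvAdj, ← pvLookup_eq_lookup, hns]
    have hchild : ∀ d ∈ ns, ∃ v, dfsP dic (pvFuelA n) i d = some v := by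
      intro d hd
      have hdadj : d ∈ pvAdj dic i := by rw [hadjeq]; exact hd
      have hdi := H2 i hi d hdadj
      apply pvT n dic H1 H2 H5 (pvFuelA n) [] i d
      · exact List.isChain_cons_cons.2 ⟨hdi.2.2, List.IsChain.singleton i⟩
      · simp [hdi.2.1]
      · intro x hx
        rcases List.mem_cons.1 hx with rfl | hx'
        · exact hdi.1
        · rcases List.mem_cons.1 hx' with rfl | hx''
          · exact hi
          · simp at hx''
      · simp [pvFuelA]
    obtain ⟨vs, hvs⟩ := exists_forall₂ dic (pvFuelA n) i ns hchild
    have hlenvs := hvs.length_eq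
    -- A side: the inner fold over dic[i]
    obtain ⟨m1, hInner, hm1⟩ := aInner_run dic (pvFuelA n) i ns vs 0 m hvs hm
    -- B side: the stack loop over the same children
    have hnsnodes : ∀ x ∈ ns, x ∈ pvNodes n := by
      intro x hx
      exact (H2 i hi x (by rw [hadjeq]; exact hx)).1
    have hbound : ∀ v ∈ vs, v.1 ≤ ((n.toNat : Int) + 1) ^ (pvFuelA n) := by
      intro v hv
      obtain ⟨d, hd, hR⟩ := pv_forall₂_right hvs v hv
      obtain ⟨a, b⟩ := v
      exact dfsP_fst_le n dic H2 H3 (pvFuelA n) i d a b (hnsnodes d hd) hR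
    have hfuel : (vs.map Prod.fst).sum ≤ ((pvFuelB n : Nat) : Int) := by
      have hsum : (vs.map Prod.fst).sum ≤ (vs.length : Int) * ((n.toNat : Int) + 1) ^ (pvFuelA n) := by
        have := List.sum_le_card_nsmul (vs.map Prod.fst)
          (((n.toNat : Int) + 1) ^ (pvFuelA n))
          (by intro x hx; obtain ⟨v, hv, rfl⟩ := List.mem_map.1 hx; exact hbound v hv)
        simpa [nsmul_eq_mul] using this
      have hlen_ns : ns.length ≤ n.toNat := by
        apply nodup_nodes_length_le n ns _ hnsnodes
        rw [← hadjeq]; exact H3 i hi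
      have hB : (1 : Int) ≤ ((n.toNat : Int) + 1) ^ (pvFuelA n) := one_le_pow₀ (by omega)
      have hcast : ((pvFuelB n : Nat) : Int) = ((n.toNat : Int) + 1) ^ (n.toNat + 3) + 1 := by
        rw [pvFuelB]; push_cast; ring
      rw [hcast]
      have hfa : pvFuelA n = n.toNat + 2 := rfl
      rw [hfa] at hsum
      have hstep : ((n.toNat : Int) + 1) ^ (n.toNat + 3) = ((n.toNat : Int) + 1) * ((n.toNat : Int) + 1) ^ (n.toNat + 2) := by
        rw [pow_succ]; ring
      have hvslen : ((vs.length : Int)) ≤ (n.toNat : Int) := by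
        have : vs.length ≤ n.toNat := by
          have := List.length_filter_le (fun x => true) ns
          omega
        exact_mod_cast this
      have hpos : (0 : Int) ≤ ((n.toNat : Int) + 1) ^ (n.toNat + 2) := by positivity
      nlinarith [hsum, hvslen, hpos]
    have hf2stack : List.Forall₂ (fun (it : Int × Int × Int) v => PvVal dic it.1 it.2.1 v)
        ((ns.map (fun c => (i, c, 1))).reverse) vs.reverse := by
      rw [List.forall₂_reverse_iff, List.forall₂_map_left_iff]
      exact hvs.imp (fun _ _ hx => ⟨pvFuelA n, hx⟩)
    have hstack := stack_run dic (pvFuelB n) ((ns.map (fun c => (i, c, 1))).reverse) vs.reverse 0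
      hf2stack (by simpa [List.map_reverse, List.sum_reverse] using hfuel)
    have hphi : pvPhi ((ns.map (fun c => (i, c, 1))).reverse) vs.reverse = (vs.map Prod.snd).sum := by
      rw [pvPhi_reverse _ _ (by simp [hvs.length_eq])]
      have : ns.map (fun c => (i, c, 1)) = ns.map (fun nn => (i, nn, (0 : Int) + 1)) := by norm_num
      rw [this, pvPhi_map i 0 ns vs hvs.length_eq]
      simp
    -- combine the two step results and recurse
    obtain ⟨best, m', hA, hB⟩ := ih (fun x hx => hsub x (by simp [hx])) (max (0 + (vs.map Prod.snd).sum) res) m1 hm1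
    refine ⟨best, m', ?_, ?_⟩
    · rw [optFold]
      simp only [aStepOuter, hns, hInner]
      exact hA
    · rw [optFold]
      simp only [bStep, hns, hstack, hphi]
      rw [show max res (0 + (vs.map Prod.snd).sum) = max (0 + (vs.map Prod.snd).sum) res from max_comm _ _]
      exact hB

-- ===== VERDICT (by name: the statement is the Claim_ definition above) =====
theorem tree_painting_spec : Claim_equal_tree_painting := by
  intro n dic _ hpre
  unfold Spec_tree_painting
  rcases hpre with hle | hforest
  · have hnil : PySem.List.pyRange 1 (n + 1) 1 = [] := PySem.List.pyRange_one_eq_nil (by omega)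
    rw [tree_painting, tree_painting_alt, hnil]
    simp [optFold]
  · obtain ⟨H1, H2, H3, H5⟩ := pvForest_spec n dic hforest
    obtain ⟨best, m', hA, hB⟩ :=
      loops_eq n dic H1 H2 H3 H5 (pvNodes n) (fun _ hx => hx) 0 PySem.Dict.empty (coherent_empty dic)
    rw [tree_painting, tree_painting_alt]
    rw [show PySem.List.pyRange 1 (n + 1) 1 = pvNodes n from rfl]
    simp only [hA, hB]
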